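-- pv_equiv track=rewrite | github.com/LibenHailu/interview-prep | contest/a2svians/A_Outlets_and_Dividers.py | solution
-- ===== SOURCE A (Python) =====
-- import heapq
--
-- def solution(target, outlets):
--     if target <= 2:
--         return 0
--
--     free = 2
--     heap = []
--     for outlet in outlets:
--         heapq.heappush(heap, -outlet)
--
--     res = 0
--     while heap and target > free:
--         free -= 1
--         free += -heapq.heappop(heap)
--         res += 1
--     return res if target <= free else -1
-- ===== SOURCE B (Python) =====
-- def solution(target, outlets):
--     if target <= 2:
--         return 0
--     need = target - 2
--     # staged pass 1: descending prefix sums of (outlet - 1)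
--     prefix = []
--     s = 0
--     for x in sorted(outlets, reverse=True):
--         s += x - 1
--         prefix.append(s)
--     # staged pass 2: running maximum (monotone envelope of the prefix sums)
--     best = []
--     m = None
--     for p in prefix:
--         if m is None or p > m:
--             m = p
--         best.append(m)
--     # binary search on the monotone envelope for the first index reaching need
--     lo, hi = 0, len(best)
--     while lo < hi:
--         mid = (lo + hi) // 2
--         if best[mid] >= need:
--             hi = mid
--         else:
--             lo = mid + 1
--     return lo + 1 if lo < len(best) else -1
-- ===== Notes on version B (the rewrite author's own statement) =====
-- stated objective: alternative
-- what changed: Replaces A's lazy max-heap consume-until-satisfied loop by three staged passes with no early-exit accumulator loop: descending prefix sums of (outlet-1), their running-maximum envelope, then a binary search on that monotone envelope for the first index reaching target-2.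
import Mathlib
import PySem

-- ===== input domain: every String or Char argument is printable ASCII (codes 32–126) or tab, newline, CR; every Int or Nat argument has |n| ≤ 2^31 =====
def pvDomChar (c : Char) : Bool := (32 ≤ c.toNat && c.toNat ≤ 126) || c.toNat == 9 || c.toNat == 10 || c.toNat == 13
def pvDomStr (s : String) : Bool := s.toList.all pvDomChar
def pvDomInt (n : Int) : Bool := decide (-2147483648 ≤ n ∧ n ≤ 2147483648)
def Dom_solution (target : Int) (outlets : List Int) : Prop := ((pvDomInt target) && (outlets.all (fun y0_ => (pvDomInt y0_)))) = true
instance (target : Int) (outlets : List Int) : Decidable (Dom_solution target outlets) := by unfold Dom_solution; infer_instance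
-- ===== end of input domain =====

-- B replaces A's lazy max-heap consume-until-satisfied loop by staged passes (descending prefix sums, running-max envelope, binary search); same result, same asymptotics.


-- ===== PORT A =====
-- A's while loop: `while heap and target > free: free -= 1; free += -heappop(heap); res += 1`.
-- heapq.heappop is a library call, ported by its contract: it removes and returns the smallest
-- element (PySem.List.min?, then List.erase). Exact for Int elements, where tied values are identical.
def heapLoopA (target free res : Int) (heap : List Int) : Int :=
  match hm : PySem.List.min? heap (fun x => x) with
  | none => if target ≤ free then res else -1
  | some m =>
    if target > free then
      heapLoopA target (free - 1 + (-m)) (res + 1) (heap.erase m)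
    else if target ≤ free then res else -1
termination_by heap.length
decreasing_by
  exact List.length_erase_of_mem (PySem.List.min?_mem hm) ▸
    Nat.sub_lt (List.length_pos_of_mem (PySem.List.min?_mem hm)) Nat.one_pos

def solution (target : Int) (outlets : List Int) : Int :=
  if target ≤ 2 then 0
  else
    -- for outlet in outlets: heappush(heap, -outlet)   (push contract: add the element)
    let heap := outlets.foldl (fun h o => h ++ [-o]) []
    heapLoopA target 2 0 heap

-- ===== PORT B =====
-- pass 1: for x in sorted(outlets, reverse=True): s += x - 1; prefix.append(s)
-- pass 2: for p in prefix: if m is None or p > m: m = p; best.append(m)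
-- pass 3: while lo < hi: mid = (lo+hi)//2; if best[mid] >= need: hi = mid else: lo = mid+1
-- best[mid] is always in range (lo < hi ≤ len best), so getD is exact here.
def bsearchB (best : List Int) (need : Int) (lo hi : Nat) : Nat :=
  if lo < hi then
    let mid := (lo + hi) / 2
    if need ≤ best.getD mid 0 then bsearchB best need lo mid
    else bsearchB best need (mid + 1) hi
  else lo
termination_by hi - lo
decreasing_by all_goals omega

def solution_alt (target : Int) (outlets : List Int) : Int :=
  if target ≤ 2 then 0
  else
    let need := target - 2
    let pfx := (PySem.List.sorted outlets (fun x => x) true).foldl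
      (fun (st : List Int × Int) x => (st.1 ++ [st.2 + (x - 1)], st.2 + (x - 1))) ([], 0)
    let best := (pfx.1.foldl
      (fun (st : List Int × Option Int) p =>
        let m : Int := match st.2 with | none => p | some mm => if mm < p then p else mm
        (st.1 ++ [m], some m)) ([], none)).1
    let lo := bsearchB best need 0 best.length
    if lo < best.length then (lo : Int) + 1 else -1

-- ===== PRECONDITION & SPEC =====
def Spec_solution (target : Int) (outlets : List Int) (out : Int) : Prop := out = solution_alt target outlets
instance (target : Int) (outlets : List Int) (out : Int) : Decidable (Spec_solution target outlets out) := by unfold Spec_solution; infer_instance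

-- ===== CLAIM (what is proved, stated in full; the proofs are below) =====
def Claim_equal_solution : Prop := ∀ (target : Int) (outlets : List Int), Dom_solution target outlets → Spec_solution target outlets (solution target outlets)

-- ===== LEMMAS AND PROOFS =====

-- A-side characterization: an early-exit linear scan over a descending list.
def loopAB (target free res : Int) : List Int → Int
  | [] => if target ≤ free then res else -1
  | x :: xs =>
    if target ≤ free then res
    else loopAB target (free + (x - 1)) (res + 1) xs

-- A's heap loop, run on any permutation of the negations of a descending list d,
-- computes exactly the linear scan loopAB over d.
lemma heapLoopA_eq_loopAB (target : Int) (d : List Int)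
    (hd : d.Pairwise (fun a b => b ≤ a)) :
    ∀ (free res : Int) (heap : List Int), heap.Perm (d.map (fun z : Int => -z)) →
      heapLoopA target free res heap = loopAB target free res d := by
  induction d with
  | nil =>
    intro free res heap hp
    have : heap = [] := List.Perm.eq_nil hp
    subst this
    rw [heapLoopA, loopAB]
    simp [PySem.List.min?]
  | cons x xs ih =>
    intro free res heap hp
    have hxmem : (-x) ∈ heap := hp.mem_iff.mpr (by simp)
    have hne : heap ≠ [] := by
      intro h; subst h; simp at hxmem
    obtain ⟨m, hm⟩ : ∃ m, PySem.List.min? heap (fun y => y) = some m := by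
      cases hmin : PySem.List.min? heap (fun y => y) with
      | none => exact absurd ((PySem.List.min?_eq_none_iff heap _).mp hmin) hne
      | some m => exact ⟨m, rfl⟩
    have hmmem : m ∈ heap := PySem.List.min?_mem hm
    have hmin : ∀ y ∈ heap, m ≤ y := fun y hy => PySem.List.min?_isMin hm y hy
    have hmx : m = -x := by
      have h1 : m ≤ -x := hmin _ hxmem
      have h2 : -x ≤ m := by
        have : m ∈ (x :: xs).map (fun z : Int => -z) := hp.mem_iff.mp hmmem
        simp only [List.map_cons, List.mem_cons, List.mem_map] at this
        rcases this with h | ⟨y, hy, rfl⟩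
        · omega
        · have : y ≤ x := (List.pairwise_cons.mp hd).1 y hy
          omega
      omega
    subst hmx
    rw [heapLoopA]
    split
    · next hnone => rw [hm] at hnone; cases hnone
    next m' hsome =>
    obtain rfl : m' = -x := Option.some.inj (hsome.symm.trans hm)
    by_cases hg : target > free
    · rw [if_pos hg, loopAB, if_neg (by omega)]
      have hperm' : (heap.erase (-x)).Perm (xs.map (fun z : Int => -z)) := by
        have := hp.erase (-x)
        rw [List.map_cons, List.erase_cons_head] at this
        exact this
      have := ih (List.pairwise_cons.mp hd).2 (free - 1 + (- -x)) (res + 1) _ hperm'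
      rw [this]
      congr 1
      omega
    · rw [if_neg hg, if_pos (by omega), loopAB, if_pos (by omega)]

lemma heap_build_eq (outlets : List Int) :
    outlets.foldl (fun h o => h ++ [-o]) [] = outlets.map (fun z : Int => -z) := by
  have := PySem.List.foldl_append_singleton_eq_map (f := fun o : Int => -o) (l := outlets) (acc := ([] : List Int))
  simpa using this

-- first index at which the scan succeeds (0-based count of consumed elements; some k checks before consuming)
def firstK (t f : Int) : List Int → Option Nat
  | [] => if t ≤ f then some 0 else none
  | x :: xs => if t ≤ f then some 0 else (firstK t (f + (x - 1)) xs).map (· + 1)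

lemma loopAB_eq_firstK (t : Int) : ∀ (d : List Int) (f r : Int),
    loopAB t f r d = match firstK t f d with
      | some k => r + (k : Int)
      | none => -1 := by
  intro d
  induction d with
  | nil => intro f r; rw [loopAB, firstK]; split_ifs <;> simp
  | cons x xs ih =>
    intro f r
    rw [loopAB, firstK]
    by_cases h : t ≤ f
    · simp [h]
    · rw [if_neg h, if_neg h, ih]
      cases firstK t (f + (x - 1)) xs with
      | none => simp
      | some k => simp; ring

-- recursive form of pass 1 (prefix sums starting from accumulated value s)
def prefixSums (s : Int) : List Int → List Int
  | [] => []
  | x :: xs => (s + (x - 1)) :: prefixSums (s + (x - 1)) xs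

lemma prefix_fold_eq : ∀ (d : List Int) (acc : List Int) (s : Int),
    d.foldl (fun (st : List Int × Int) x => (st.1 ++ [st.2 + (x - 1)], st.2 + (x - 1))) (acc, s)
      = (acc ++ prefixSums s d, s + ((d.map (fun x => x - 1)).sum)) := by
  intro d
  induction d with
  | nil => intro acc s; simp [prefixSums]
  | cons x xs ih =>
    intro acc s
    simp only [List.foldl_cons, prefixSums, ih, List.map_cons, List.sum_cons, Prod.mk.injEq]
    exact ⟨by simp, by ring⟩

-- recursive form of pass 2 (running maximum, m is the max so far if any)
def runMax (m : Option Int) : List Int → List Int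
  | [] => []
  | p :: ps =>
    let m' : Int := match m with | none => p | some mm => if mm < p then p else mm
    m' :: runMax (some m') ps

lemma best_fold_eq : ∀ (ps : List Int) (acc : List Int) (m : Option Int),
    (ps.foldl (fun (st : List Int × Option Int) p =>
        let mm : Int := match st.2 with | none => p | some mm => if mm < p then p else mm
        (st.1 ++ [mm], some mm)) (acc, m)).1 = acc ++ runMax m ps := by
  intro ps
  induction ps with
  | nil => intro acc m; simp [runMax]
  | cons p ps ih =>
    intro acc m
    simp only [List.foldl_cons, runMax, ih]
    simp

lemma runMax_length : ∀ (ps : List Int) (m : Option Int), (runMax m ps).length = ps.length := by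
  intro ps
  induction ps with
  | nil => intro m; rfl
  | cons p ps ih => intro m; simp [runMax, ih]

-- running max with carried max m is < t at index i iff the carried max and every prefix value up to i are < t
lemma runMax_some_lt (t : Int) : ∀ (ps : List Int) (m : Int) (i : Nat), i < ps.length →
    ((runMax (some m) ps).getD i 0 < t ↔ ((∀ j ≤ i, ps.getD j 0 < t) ∧ m < t)) := by
  intro ps
  induction ps with
  | nil => intro m i hi; simp at hi
  | cons p ps ih =>
    intro m i hi
    have hmax : (if m < p then p else m) = max p m := by
      rcases lt_or_ge m p with h | h
      · rw [if_pos h, max_eq_left h.le]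
      · rw [if_neg (by omega), max_eq_right h]
    cases i with
    | zero =>
      simp only [runMax, hmax, List.getD_cons_zero]
      constructor
      · intro h
        refine ⟨fun j hj => ?_, ?_⟩
        · interval_cases j; simp only [List.getD_cons_zero]; omega
        · omega
      · intro ⟨h1, h2⟩
        have := h1 0 le_rfl
        simp only [List.getD_cons_zero] at this
        omega
    | succ i =>
      simp only [runMax, hmax, List.getD_cons_succ]
      rw [ih (max p m) i (by simpa using hi)]
      constructor
      · intro ⟨h1, h2⟩
        refine ⟨fun j hj => ?_, by omega⟩
        cases j with
        | zero => simp only [List.getD_cons_zero]; omega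
        | succ j => simpa using h1 j (by omega)
      · intro ⟨h1, h2⟩
        refine ⟨fun j hj => by simpa using h1 (j + 1) (by omega), ?_⟩
        have := h1 0 (by omega)
        simp only [List.getD_cons_zero] at this
        omega

-- running max (no carried value yet) is < t at index i iff every prefix value up to i is < t
lemma runMax_lt (t : Int) : ∀ (ps : List Int) (i : Nat), i < ps.length →
    ((runMax none ps).getD i 0 < t ↔ (∀ j ≤ i, ps.getD j 0 < t)) := by
  intro ps
  cases ps with
  | nil => intro i hi; simp at hi
  | cons p ps =>
    intro i hi
    cases i with
    | zero =>
      simp only [runMax, List.getD_cons_zero]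
      constructor
      · intro h j hj; interval_cases j; simpa using h
      · intro h; simpa using h 0 le_rfl
    | succ i =>
      simp only [runMax, List.getD_cons_succ]
      rw [runMax_some_lt t ps p i (by simpa using hi)]
      constructor
      · intro ⟨h1, h2⟩ j hj
        cases j with
        | zero => simpa using h2
        | succ j => simpa using h1 j (by omega)
      · intro h
        exact ⟨fun j hj => by simpa using h (j + 1) (by omega), by simpa using h 0 (by omega)⟩

-- monotonicity of the running-max envelope
lemma runMax_mono (ps : List Int) (i j : Nat) (hij : i ≤ j) (hj : j < ps.length) :
    (runMax none ps).getD i 0 ≤ (runMax none ps).getD j 0 := by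
  by_contra h
  push_neg at h
  have hi : i < ps.length := lt_of_le_of_lt hij hj
  have hjlt : (runMax none ps).getD j 0 < (runMax none ps).getD i 0 := h
  have := (runMax_lt ((runMax none ps).getD i 0) ps j hj).mp hjlt
  have hilt := (runMax_lt ((runMax none ps).getD i 0) ps i hi).mpr
    (fun k hk => this k (le_trans hk hij))
  omega

-- binary search correctness: with the two loop invariants, it returns the boundary
lemma bsearchB_spec (best : List Int) (need : Int)
    (mono : ∀ i j, i ≤ j → j < best.length → best.getD i 0 ≤ best.getD j 0) :
    ∀ (lo hi : Nat), lo ≤ hi → hi ≤ best.length →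
    (∀ j < lo, best.getD j 0 < need) →
    (hi < best.length → need ≤ best.getD hi 0) →
    let r := bsearchB best need lo hi
    (∀ j < r, best.getD j 0 < need) ∧ (r < best.length → need ≤ best.getD r 0) ∧ r ≤ best.length := by
  intro lo hi
  induction hhi : hi - lo using Nat.strong_induction_on generalizing lo hi with
  | _ n ih =>
  intro hlohi hhib hinv1 hinv2
  rw [bsearchB]
  by_cases hlt : lo < hi
  · rw [if_pos hlt]
    set mid := (lo + hi) / 2 with hmid
    have hmlt : mid < hi := by omega
    have hmge : lo ≤ mid := by omega
    by_cases hc : need ≤ best.getD mid 0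
    · rw [if_pos hc]
      exact ih (mid - lo) (by omega) lo mid rfl hmge (by omega) hinv1
        (fun _ => hc)
    · rw [if_neg hc]
      refine ih (hi - (mid + 1)) (by omega) (mid + 1) hi rfl (by omega) hhib ?_ hinv2
      intro j hj
      by_cases hjlo : j < lo
      · exact hinv1 j hjlo
      · have : best.getD j 0 ≤ best.getD mid 0 := mono j mid (by omega) (by omega)
        omega
  · rw [if_neg hlt]
    have : lo = hi := by omega
    subst this
    exact ⟨hinv1, hinv2, hhib⟩

-- first index in a list whose value is ≥ t
def firstGE (t : Int) : List Int → Option Nat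
  | [] => none
  | p :: ps => if t ≤ p then some 0 else (firstGE t ps).map (· + 1)

lemma firstK_eq_firstGE (t : Int) : ∀ (d : List Int) (s : Int), t > s →
    firstK t s d = (firstGE t (prefixSums s d)).map (· + 1) := by
  intro d
  induction d with
  | nil => intro s hs; rw [firstK, prefixSums, firstGE]; simp; omega
  | cons x xs ih =>
    intro s hs
    rw [firstK, prefixSums, firstGE, if_neg (by omega)]
    by_cases h : t ≤ s + (x - 1)
    · rw [if_pos h]
      have hk : firstK t (s + (x - 1)) xs = some 0 := by
        cases xs <;> rw [firstK] <;> simp [h]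
      rw [hk]
    · rw [if_neg h, ih _ (by omega)]

-- shifting the accumulated base shifts every prefix sum
lemma prefixSums_shift (c : Int) : ∀ (d : List Int) (s : Int),
    prefixSums (c + s) d = (prefixSums s d).map (fun z => c + z) := by
  intro d
  induction d with
  | nil => intro s; rfl
  | cons x xs ih =>
    intro s
    simp only [prefixSums, List.map_cons, List.cons.injEq]
    refine ⟨by ring, ?_⟩
    rw [show c + s + (x - 1) = c + (s + (x - 1)) by ring, ih]

-- searching a shifted list is searching for the shifted threshold
lemma firstGE_shift (t c : Int) : ∀ (l : List Int),
    firstGE t (l.map (fun z => c + z)) = firstGE (t - c) l := by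
  intro l
  induction l with
  | nil => rfl
  | cons p ps ih =>
    simp only [List.map_cons, firstGE, ih]
    by_cases h : t - c ≤ p
    · rw [if_pos (by omega), if_pos h]
    · rw [if_neg (by omega), if_neg h]

-- firstGE from the boundary facts: r is the first index with value ≥ t
lemma firstGE_of_bounds (t : Int) : ∀ (ps : List Int) (r : Nat),
    (∀ j < r, ps.getD j 0 < t) → (r < ps.length → t ≤ ps.getD r 0) → r ≤ ps.length →
    firstGE t ps = if r < ps.length then some r else none := by
  intro ps
  induction ps with
  | nil => intro r _ _ hr; simp only [List.length_nil, Nat.le_zero] at hr; subst hr; rfl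
  | cons p ps ih =>
    intro r h1 h2 h3
    rw [firstGE]
    cases r with
    | zero =>
      have := h2 (by simp)
      simp only [List.getD_cons_zero] at this
      rw [if_pos this]
      simp
    | succ r =>
      have hp : p < t := by simpa using h1 0 (by omega)
      rw [if_neg (by omega)]
      have := ih r (fun j hj => by simpa using h1 (j + 1) (by omega))
        (fun hr => by simpa using h2 (by simpa using hr)) (by simpa using h3)
      rw [this]
      by_cases hr : r < ps.length
      · rw [if_pos hr, if_pos (by simpa using hr)]; rfl
      · rw [if_neg hr, if_neg (by simp only [List.length_cons]; omega)]; rfl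

-- relate firstGE on the prefix list with firstGE facts transported through runMax:
-- the binary-search boundary on the envelope is also the firstGE boundary on the raw prefix list
lemma boundary_transfer (t : Int) (ps : List Int) (r : Nat)
    (h1 : ∀ j < r, (runMax none ps).getD j 0 < t)
    (h2 : r < ps.length → t ≤ (runMax none ps).getD r 0)
    (h3 : r ≤ ps.length) :
    (∀ j < r, ps.getD j 0 < t) ∧ (r < ps.length → t ≤ ps.getD r 0) := by
  constructor
  · intro j hj
    have hjlen : j < ps.length := by omega
    exact (runMax_lt t ps j hjlen).mp (h1 j hj) j le_rfl
  · intro hr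
    by_contra hc
    push_neg at hc
    have hall : ∀ j ≤ r, ps.getD j 0 < t := by
      intro j hj
      rcases Nat.lt_or_ge j r with h | h
      · have hjlen : j < ps.length := by omega
        exact (runMax_lt t ps j hjlen).mp (h1 j h) j le_rfl
      · have : j = r := by omega
        subst this; exact hc
    have := (runMax_lt t ps r hr).mpr hall
    have := h2 hr
    omega

-- ===== VERDICT (by name: the statement is the Claim_ definition above) =====
theorem solution_spec : Claim_equal_solution := by
  intro target outlets _
  unfold Spec_solution solution solution_alt
  by_cases ht : target ≤ 2
  · simp [ht]
  · simp only [if_neg ht]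
    rw [heap_build_eq]
    set d := PySem.List.sorted outlets (fun x => x) true with hdd
    have hd : d.Pairwise (fun a b => b ≤ a) :=
      PySem.List.sorted_pairwise_rev outlets (fun x => x)
    have hp : (outlets.map (fun z : Int => -z)).Perm (d.map (fun z : Int => -z)) :=
      ((PySem.List.sorted_perm outlets (fun x => x) true).map (fun z : Int => -z)).symm
    have hsh : prefixSums 2 d = (prefixSums 0 d).map (fun z => 2 + z) := by
      have h20 := prefixSums_shift 2 d 0
      norm_num at h20
      exact h20
    rw [heapLoopA_eq_loopAB target d hd 2 0 _ hp, loopAB_eq_firstK,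
        firstK_eq_firstGE target d 2 (by omega), hsh, firstGE_shift]
    -- unfold B's staged passes to the recursive forms
    simp only [prefix_fold_eq, List.nil_append, best_fold_eq]
    set need := target - 2 with hneed
    set ps := prefixSums 0 d with hps
    set best := runMax none ps with hbest
    have hlen : best.length = ps.length := runMax_length ps none
    have mono : ∀ i j, i ≤ j → j < best.length → best.getD i 0 ≤ best.getD j 0 := by
      intro i j hij hj
      exact runMax_mono ps i j hij (by omega)
    have hs := bsearchB_spec best need mono 0 best.length (by omega) le_rfl
      (by omega) (by omega)
    set r := bsearchB best need 0 best.length with hr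
    obtain ⟨b1, b2, b3⟩ := hs
    have htr := boundary_transfer need ps r (by rw [← hbest]; exact b1)
      (by rw [← hbest]; intro h; exact b2 (by omega)) (by omega)
    rw [firstGE_of_bounds need ps r htr.1 htr.2 (by omega)]
    by_cases hrl : r < best.length
    · rw [if_pos (by omega : r < ps.length), if_pos hrl]
      simp
    · rw [if_neg (by omega : ¬ r < ps.length), if_neg hrl]
      rfl
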